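-- pv_equiv track=rewrite | github.com/NeuralBlitz/fishstick | fishstick/knowledge_graph/schema.py | _infer_inverse_relations
-- ===== SOURCE A (Python) =====
-- from typing import Dict, List, Set, Optional, Tuple, Any, Callable
-- from collections import defaultdict
--
-- def _infer_inverse_relations(
--
--     triplets: List[Tuple[str, str, str]],
--     min_frequency: int,
-- ) -> Dict[str, str]:
--     """Infer inverse relations."""
--     relation_pairs: Dict[str, Set[Tuple[str, str]]] = defaultdict(set)
--
--     for s, p, o in triplets:
--         relation_pairs[p].add((s, o))
--
--     potential_inverses: Dict[str, Dict[str, int]] = defaultdict(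
--         lambda: defaultdict(int)
--     )
--
--     for rel1, pairs1 in relation_pairs.items():
--         for rel2, pairs2 in relation_pairs.items():
--             if rel1 != rel2:
--                 inverse_count = sum(1 for s, o in pairs1 if (o, s) in pairs2)
--
--                 if inverse_count >= min_frequency:
--                     potential_inverses[rel1][rel2] = inverse_count
--
--     inverses = {}
--
--     for rel, candidates in potential_inverses.items():
--         if candidates:
--             best_inverse = max(candidates.keys(), key=lambda x: candidates[x])
--             inverses[rel] = best_inverse
--
--     return inverses
-- ===== SOURCE B (Python) =====
-- def _infer_inverse_relations(triplets, min_frequency):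
--     """Infer inverse relations via a reversed-pair index (one pass over the
--     data instead of comparing every pair of relations pair-set against pair-set)."""
--     order = []
--     pairs_by_rel = {}
--     for s, p, o in triplets:
--         if p not in pairs_by_rel:
--             order.append(p)
--             pairs_by_rel[p] = set()
--         pairs_by_rel[p].add((s, o))
--
--     # index: pair -> list of relations whose pair set contains it
--     rels_of_pair = {}
--     for r in order:
--         for q in pairs_by_rel[r]:
--             rels_of_pair.setdefault(q, []).append(r)
--
--     inverses = {}
--     for r1 in order:
--         counts = {}
--         for s, o in pairs_by_rel[r1]:
--             for r2 in rels_of_pair.get((o, s), []):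
--                 if r2 != r1:
--                     counts[r2] = counts.get(r2, 0) + 1
--         best = None
--         best_count = None
--         for r2 in order:
--             if r2 == r1:
--                 continue
--             c = counts.get(r2, 0)
--             if c >= min_frequency and (best_count is None or c > best_count):
--                 best, best_count = r2, c
--         if best is not None:
--             inverses[r1] = best
--     return inverses
-- ===== Notes on version B (the rewrite author's own statement) =====
-- stated objective: faster
-- what changed: A compares every ordered pair of relations by scanning one pair set against the other (membership test per pair, per relation pair); B builds a reversed-pair index (pair -> relations whose set contains it) once and accumulates all inverse counts in a single walk over each relation's pairs, then picks each best inverse by one linear scan in first-occurrence order.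
import Mathlib
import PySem

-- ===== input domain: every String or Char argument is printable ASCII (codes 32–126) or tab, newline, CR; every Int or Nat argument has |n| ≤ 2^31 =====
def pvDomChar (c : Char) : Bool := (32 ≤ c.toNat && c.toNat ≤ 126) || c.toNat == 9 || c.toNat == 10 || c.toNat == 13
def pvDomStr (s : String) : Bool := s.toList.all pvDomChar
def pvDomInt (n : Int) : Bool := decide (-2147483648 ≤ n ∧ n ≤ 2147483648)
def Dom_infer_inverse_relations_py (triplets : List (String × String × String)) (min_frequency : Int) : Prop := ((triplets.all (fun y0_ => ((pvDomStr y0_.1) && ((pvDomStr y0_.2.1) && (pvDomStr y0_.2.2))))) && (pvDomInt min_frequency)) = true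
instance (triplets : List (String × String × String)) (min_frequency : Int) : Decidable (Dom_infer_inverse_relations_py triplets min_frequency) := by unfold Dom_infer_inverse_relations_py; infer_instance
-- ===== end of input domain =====

-- B replaces A's all-pairs relation-vs-relation pair-set scan by a reversed-pair index
-- (pair -> relations containing it) built once, accumulating the inverse counts while
-- walking each relation's pairs; objective: faster on data with many relations.

-- ===== PORT A =====
-- A's grouping loop: relation_pairs[p].add((s, o))  (defaultdict(set))
def pvA_relationPairs (triplets : List (String × String × String)) :
    PySem.Dict String (PySem.Set (String × String)) :=
  triplets.foldl
    (fun d t => d.modify t.2.1 [] (fun s => PySem.Set.add s (t.1, t.2.2)))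
    PySem.Dict.empty

-- A's nested loop: for rel1, pairs1 in items: for rel2, pairs2 in items: ...
def pvA_potential (relation_pairs : PySem.Dict String (PySem.Set (String × String)))
    (min_frequency : Int) : PySem.Dict String (PySem.Dict String Int) :=
  relation_pairs.items.foldl (fun pi p1 =>
    relation_pairs.items.foldl (fun pi p2 =>
      if p1.1 ≠ p2.1 then
        -- inverse_count = sum(1 for s, o in pairs1 if (o, s) in pairs2)
        let inverse_count : Int :=
          ((p1.2.filter (fun so => PySem.Set.contains p2.2 (so.2, so.1))).map
            (fun _ => (1 : Int))).sum
        if min_frequency ≤ inverse_count then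
          pi.modify p1.1 PySem.Dict.empty (fun d => d.insert p2.1 inverse_count)
        else pi
      else pi) pi)
    PySem.Dict.empty

-- A's last loop: for rel, candidates in items: if candidates: best = max(keys, key=...)
def pvA_final (potential_inverses : PySem.Dict String (PySem.Dict String Int)) :
    PySem.Dict String String :=
  potential_inverses.items.foldl (fun inv rc =>
    if rc.2.size ≠ 0 then
      match PySem.List.max? rc.2.keys (fun x => rc.2.getD x 0) with
      | some best => inv.insert rc.1 best
      | none => inv   -- unreachable: keys nonempty under the size guard
    else inv)
    PySem.Dict.empty

def infer_inverse_relations_py (triplets : List (String × String × String)) (min_frequency : Int) : List (String × String) :=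
  (pvA_final (pvA_potential (pvA_relationPairs triplets) min_frequency)).items

-- ===== PORT B =====
-- grouping loop with an explicit first-occurrence order list
def pvB_group (triplets : List (String × String × String)) :
    List String × PySem.Dict String (PySem.Set (String × String)) :=
  triplets.foldl
    (fun st t =>
      let st' := if st.2.contains t.2.1 then st else (st.1 ++ [t.2.1], st.2.insert t.2.1 [])
      (st'.1, st'.2.modify t.2.1 [] (fun s => PySem.Set.add s (t.1, t.2.2))))
    ([], PySem.Dict.empty)

-- index: pair -> list of relations whose pair set contains it
def pvB_rels (order : List String)
    (pairs_by_rel : PySem.Dict String (PySem.Set (String × String))) :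
    PySem.Dict (String × String) (List String) :=
  order.foldl (fun d r =>
    (pairs_by_rel.getD r []).foldl (fun d q => d.modify q [] (fun l => l ++ [r])) d)
    PySem.Dict.empty

-- counts[r2] = counts.get(r2, 0) + 1, walking r1's pairs through the index
def pvB_counts (pairs_by_rel : PySem.Dict String (PySem.Set (String × String)))
    (rels_of_pair : PySem.Dict (String × String) (List String)) (r1 : String) :
    PySem.Dict String Int :=
  (pairs_by_rel.getD r1 []).foldl (fun c so =>
    (rels_of_pair.getD (so.2, so.1) []).foldl
      (fun c r2 => if r2 ≠ r1 then c.modify r2 0 (· + 1) else c) c)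
    PySem.Dict.empty

-- linear scan: first qualifying relation with maximal count, in first-occurrence order
def pvB_best (order : List String) (counts : PySem.Dict String Int)
    (min_frequency : Int) (r1 : String) : Option String × Option Int :=
  order.foldl (fun b r2 =>
    if r2 = r1 then b
    else
      let c := counts.getD r2 0
      if (decide (min_frequency ≤ c) &&
          (match b.2 with | none => true | some bc => decide (bc < c))) = true
      then (some r2, some c) else b)
    ((none : Option String), (none : Option Int))

def infer_inverse_relations_py_alt (triplets : List (String × String × String)) (min_frequency : Int) : List (String × String) :=
  let st := pvB_group triplets
  let order := st.1
  let pairs_by_rel := st.2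
  let rels_of_pair := pvB_rels order pairs_by_rel
  (order.foldl (fun inv r1 =>
    match (pvB_best order (pvB_counts pairs_by_rel rels_of_pair r1) min_frequency r1).1 with
    | some b => inv.insert r1 b
    | none => inv)
    PySem.Dict.empty).items

-- ===== PRECONDITION & SPEC =====
def Spec_infer_inverse_relations_py (triplets : List (String × String × String)) (min_frequency : Int) (out : List (String × String)) : Prop := out = infer_inverse_relations_py_alt triplets min_frequency
instance (triplets : List (String × String × String)) (min_frequency : Int) (out : List (String × String)) : Decidable (Spec_infer_inverse_relations_py triplets min_frequency out) := by unfold Spec_infer_inverse_relations_py; infer_instance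

-- ===== CLAIM (what is proved, stated in full; the proofs are below) =====
def Claim_equal_infer_inverse_relations_py : Prop := ∀ (triplets : List (String × String × String)) (min_frequency : Int), Dom_infer_inverse_relations_py triplets min_frequency → Spec_infer_inverse_relations_py triplets min_frequency (infer_inverse_relations_py triplets min_frequency)

-- ===== LEMMAS AND PROOFS =====

-- shared vocabulary: keys in first-occurrence order, pair set of a relation,
-- the inverse count, the qualifying candidates, and the common output value
def pvK (ts : List (String × String × String)) : List String := (pvA_relationPairs ts).keys
def pvPairs (ts : List (String × String × String)) (r : String) : PySem.Set (String × String) :=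
  (pvA_relationPairs ts).getD r []
def pvCnt (ts : List (String × String × String)) (r1 r2 : String) : Int :=
  (((pvPairs ts r1).filter (fun so => PySem.Set.contains (pvPairs ts r2) (so.2, so.1))).map
    (fun _ => (1 : Int))).sum
def pvQual (ts : List (String × String × String)) (mf : Int) (r1 : String) : List String :=
  (pvK ts).filter (fun r2 => decide (r1 ≠ r2 ∧ mf ≤ pvCnt ts r1 r2))
def pvCand (ts : List (String × String × String)) (mf : Int) (r1 : String) : PySem.Dict String Int :=
  (pvQual ts mf r1).foldl (fun d r2 => d.insert r2 (pvCnt ts r1 r2)) PySem.Dict.empty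
def pvBest (ts : List (String × String × String)) (mf : Int) (r1 : String) : String :=
  (PySem.List.max? (pvQual ts mf r1) (fun r2 => pvCnt ts r1 r2)).getD ""
def pvOut (ts : List (String × String × String)) (mf : Int) : List (String × String) :=
  ((pvK ts).filter (fun r1 => decide (pvQual ts mf r1 ≠ []))).map (fun r1 => (r1, pvBest ts mf r1))

theorem pvK_nodup (ts : List (String × String × String)) : (pvK ts).Nodup :=
  PySem.Dict.nodup_keys_foldl_modify_key ts (fun t => t.2.1) []
    (fun _ t s => PySem.Set.add s (t.1, t.2.2)) PySem.Dict.empty PySem.Dict.nodup_keys_empty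

theorem pv_pairs_aux (l : List (String × String × String))
    (d : PySem.Dict String (PySem.Set (String × String)))
    (h : ∀ r, (d.getD r []).Nodup) (r : String) :
    ((l.foldl (fun d t => d.modify t.2.1 [] (fun s => PySem.Set.add s (t.1, t.2.2))) d).getD r []).Nodup := by
  induction l generalizing d with
  | nil => exact h r
  | cons t l ih =>
    refine ih _ (fun r' => ?_)
    rw [PySem.Dict.getD_modify]
    split
    · exact PySem.Set.nodup_add _ _ (h _)
    · exact h r'

theorem pvPairs_nodup (ts : List (String × String × String)) (r : String) : (pvPairs ts r).Nodup :=
  pv_pairs_aux ts PySem.Dict.empty (fun r' => by simp [PySem.Dict.getD_empty]) r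

theorem pvA_items (ts : List (String × String × String)) :
    (pvA_relationPairs ts).items = (pvK ts).map (fun r => (r, pvPairs ts r)) :=
  PySem.Dict.items_eq_map_keys _ (pvK_nodup ts) []

theorem pv_set_add_idem {α : Type} [BEq α] [LawfulBEq α] (s : PySem.Set α) (x : α) :
    PySem.Set.add (PySem.Set.add s x) x = PySem.Set.add s x := by
  by_cases h : x ∈ s
  · simp [PySem.Set.add, h]
  · simp [PySem.Set.add, h]

theorem pv_keys_modify {κ ν : Type} [BEq κ] [LawfulBEq κ] (d : PySem.Dict κ ν) (k : κ) (d0 : ν) (f : ν → ν) :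
    (d.modify k d0 f).keys = PySem.Set.add d.keys k := by
  rw [PySem.Dict.keys_modify]
  by_cases h : d.contains k = true
  · rw [PySem.Dict.keys_insert_of_contains _ _ h]
    have hm : k ∈ d.keys := (PySem.Dict.contains_iff_mem_keys d k).mp h
    simp [PySem.Set.add, hm]
  · rw [PySem.Dict.keys_insert_of_not_contains _ _ (by simpa using h)]
    have hm : k ∉ d.keys := fun hmem => h ((PySem.Dict.contains_iff_mem_keys d k).mpr hmem)
    simp [PySem.Set.add, hm]

-- a chain of modifies at one fixed key r1

theorem pv_modchain {ν : Type} (L : List String) (pi : PySem.Dict String ν) (r1 : String)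
    (d0 : ν) (g : ν → String → ν) :
    (∀ k, k ≠ r1 →
      (L.foldl (fun pi r2 => pi.modify r1 d0 (fun d => g d r2)) pi).get? k = pi.get? k) ∧
    (L ≠ [] →
      (L.foldl (fun pi r2 => pi.modify r1 d0 (fun d => g d r2)) pi).get? r1
        = some (L.foldl g (pi.getD r1 d0))) ∧
    ((L.foldl (fun pi r2 => pi.modify r1 d0 (fun d => g d r2)) pi).keys
        = if L = [] then pi.keys else PySem.Set.add pi.keys r1) := by
  induction L generalizing pi with
  | nil => exact ⟨fun _ _ => rfl, fun h => absurd rfl h, by simp⟩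
  | cons r2 L ih =>
    obtain ⟨ih1, ih2, ih3⟩ := ih (pi.modify r1 d0 (fun d => g d r2))
    refine ⟨fun k hk => ?_, fun _ => ?_, ?_⟩
    · rw [List.foldl_cons, ih1 k hk]
      show ((pi.insert r1 _).get? k) = pi.get? k
      rw [PySem.Dict.get?_insert]
      simp [hk]
    · rw [List.foldl_cons]
      rcases eq_or_ne L [] with hL | hL
      · subst hL
        show (pi.modify r1 d0 (fun d => g d r2)).get? r1 = _
        show ((pi.insert r1 _).get? r1) = _
        rw [PySem.Dict.get?_insert_self]
        simp
      · rw [ih2 hL]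
        rw [PySem.Dict.getD_modify_self]
        simp
    · rw [List.foldl_cons, ih3]
      rw [pv_keys_modify]
      split
      · simp
      · rw [pv_set_add_idem]; simp

theorem pv_outerA (ts : List (String × String × String)) (mf : Int)
    (K' : List String) (pi : PySem.Dict String (PySem.Dict String Int))
    (hnd : K'.Nodup) (hfresh : ∀ r ∈ K', pi.get? r = none) :
    (∀ k, k ∉ K' →
      (K'.foldl (fun pi r1 => (pvQual ts mf r1).foldl
        (fun pi r2 => pi.modify r1 PySem.Dict.empty (fun d => d.insert r2 (pvCnt ts r1 r2))) pi) pi).get? k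
      = pi.get? k) ∧
    (∀ r1 ∈ K',
      (K'.foldl (fun pi r1 => (pvQual ts mf r1).foldl
        (fun pi r2 => pi.modify r1 PySem.Dict.empty (fun d => d.insert r2 (pvCnt ts r1 r2))) pi) pi).get? r1
      = if pvQual ts mf r1 = [] then none else some (pvCand ts mf r1)) ∧
    ((K'.foldl (fun pi r1 => (pvQual ts mf r1).foldl
        (fun pi r2 => pi.modify r1 PySem.Dict.empty (fun d => d.insert r2 (pvCnt ts r1 r2))) pi) pi).keys
      = pi.keys ++ K'.filter (fun r1 => decide (pvQual ts mf r1 ≠ []))) := by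
  induction K' generalizing pi with
  | nil => exact ⟨fun _ _ => rfl, fun _ h => absurd h (List.not_mem_nil), by simp⟩
  | cons r1 K'' ih =>
    have hr1 : r1 ∉ K'' := (List.nodup_cons.mp hnd).1
    have hnd'' : K''.Nodup := (List.nodup_cons.mp hnd).2
    -- the one outer step
    obtain ⟨m1, m2, m3⟩ := pv_modchain (pvQual ts mf r1) pi r1 PySem.Dict.empty
      (fun d r2 => d.insert r2 (pvCnt ts r1 r2))
    set pi1 := (pvQual ts mf r1).foldl
      (fun pi r2 => pi.modify r1 PySem.Dict.empty (fun d => d.insert r2 (pvCnt ts r1 r2))) pi with hpi1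
    have hfresh1 : ∀ r ∈ K'', pi1.get? r = none := by
      intro r hr
      rw [m1 r (fun hrr => hr1 (hrr ▸ hr))]
      exact hfresh r (List.mem_cons_of_mem _ hr)
    obtain ⟨ih1, ih2, ih3⟩ := ih pi1 hnd'' hfresh1
    have hr1get : pi1.get? r1 = if pvQual ts mf r1 = [] then none else some (pvCand ts mf r1) := by
      rcases eq_or_ne (pvQual ts mf r1) [] with hq | hq
      · rw [hq] at hpi1; simp only [List.foldl_nil] at hpi1
        rw [hpi1, if_pos hq]
        exact hfresh r1 (List.mem_cons_self)
      · rw [if_neg hq, m2 hq]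
        have : pi.getD r1 PySem.Dict.empty = PySem.Dict.empty := by
          rw [PySem.Dict.getD_eq_get?_getD, hfresh r1 (List.mem_cons_self)]; rfl
        rw [this]; rfl
    refine ⟨fun k hk => ?_, fun r hr => ?_, ?_⟩
    · rw [List.foldl_cons, ih1 k (fun h => hk (List.mem_cons_of_mem _ h)),
        m1 k (fun h => hk (h ▸ List.mem_cons_self))]
    · rw [List.foldl_cons]
      rcases List.mem_cons.mp hr with h | h
      · subst h; rw [ih1 r hr1, hr1get]
      · exact ih2 r h
    · rw [List.foldl_cons, ih3, m3, List.filter_cons]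
      rcases eq_or_ne (pvQual ts mf r1) [] with hq | hq
      · simp [hq]
      · have hk1 : r1 ∉ pi.keys := by
          have := hfresh r1 (List.mem_cons_self)
          exact (PySem.Dict.get?_eq_none_iff_not_mem_keys pi r1).mp this
        simp [hq, PySem.Set.add, hk1]

theorem pv_max?_congr_aux {α κ : Type} [LT κ] [DecidableLT κ] (xs : List α) (f g : α → κ)
    (h : ∀ x ∈ xs, f x = g x) :
    ∀ acc : Option α, (∀ m, acc = some m → f m = g m) →
      List.foldl (fun acc x => match acc with
        | none => some x
        | some m => if f m < f x then some x else some m) acc xs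
      = List.foldl (fun acc x => match acc with
        | none => some x
        | some m => if g m < g x then some x else some m) acc xs := by
  induction xs with
  | nil => intro acc _; rfl
  | cons x t ih =>
    intro acc hacc
    have hx : f x = g x := h x (by simp)
    have ht : ∀ y ∈ t, f y = g y := fun y hy => h y (List.mem_cons_of_mem _ hy)
    cases acc with
    | none =>
      simp only [List.foldl_cons]
      exact ih ht (some x) (fun m hm => by cases hm; exact hx)
    | some m =>
      simp only [List.foldl_cons]
      show List.foldl _ (if f m < f x then some x else some m) t
          = List.foldl _ (if g m < g x then some x else some m) t
      rw [← hacc m rfl, ← hx]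
      refine ih ht _ (fun m' hm' => ?_)
      split at hm'
      · exact (Option.some.inj hm') ▸ hx
      · exact (Option.some.inj hm') ▸ hacc m rfl

theorem pv_max?_congr {α κ : Type} [LT κ] [DecidableLT κ] (xs : List α) (f g : α → κ)
    (h : ∀ x ∈ xs, f x = g x) : PySem.List.max? xs f = PySem.List.max? xs g :=
  pv_max?_congr_aux xs f g h none (by simp)

theorem pvQual_nodup (ts : List (String × String × String)) (mf : Int) (r1 : String) :
    (pvQual ts mf r1).Nodup := (pvK_nodup ts).filter _

theorem pvCand_items (ts : List (String × String × String)) (mf : Int) (r1 : String) :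
    (pvCand ts mf r1).items = (pvQual ts mf r1).map (fun r2 => (r2, pvCnt ts r1 r2)) := by
  have := PySem.Dict.items_foldl_insert_fresh (pvQual ts mf r1) (fun r2 => r2)
    (fun r2 => pvCnt ts r1 r2) PySem.Dict.empty
    (fun a _ => PySem.Dict.contains_empty a) (by simpa using pvQual_nodup ts mf r1)
  simpa [pvCand] using this

theorem pvCand_keys (ts : List (String × String × String)) (mf : Int) (r1 : String) :
    (pvCand ts mf r1).keys = pvQual ts mf r1 := by
  show (pvCand ts mf r1).items.map (fun p => p.1) = _
  rw [pvCand_items]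
  have h : ((fun p : String × Int => p.1) ∘ fun r2 => (r2, pvCnt ts r1 r2)) = id := rfl
  rw [List.map_map, h, List.map_id]

theorem pvCand_getD (ts : List (String × String × String)) (mf : Int) (r1 r2 : String)
    (h : r2 ∈ pvQual ts mf r1) : (pvCand ts mf r1).getD r2 0 = pvCnt ts r1 r2 := by
  have hmem : (r2, pvCnt ts r1 r2) ∈ (pvCand ts mf r1).items := by
    rw [pvCand_items]; exact List.mem_map.mpr ⟨r2, h, rfl⟩
  have hnd : (pvCand ts mf r1).keys.Nodup := by
    rw [pvCand_keys]; exact pvQual_nodup ts mf r1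
  exact PySem.Dict.getD_of_mem_items _ hmem hnd 0

theorem pv_insertfold (ts : List (String × String × String)) (mf : Int) :
    (((pvK ts).filter (fun r1 => decide (pvQual ts mf r1 ≠ []))).foldl
      (fun inv r1 => inv.insert r1 (pvBest ts mf r1)) PySem.Dict.empty).items = pvOut ts mf := by
  have := PySem.Dict.items_foldl_insert_fresh
    ((pvK ts).filter (fun r1 => decide (pvQual ts mf r1 ≠ []))) (fun r1 => r1)
    (fun r1 => pvBest ts mf r1) PySem.Dict.empty
    (fun a _ => PySem.Dict.contains_empty a) (by simpa using (pvK_nodup ts).filter _)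
  simpa [pvOut] using this

theorem pv_maxCand (ts : List (String × String × String)) (mf : Int) (r1 : String) :
    PySem.List.max? (pvCand ts mf r1).keys (fun x => (pvCand ts mf r1).getD x 0)
      = PySem.List.max? (pvQual ts mf r1) (fun r2 => pvCnt ts r1 r2) := by
  rw [pvCand_keys]
  exact pv_max?_congr _ _ _ (fun x hx => pvCand_getD ts mf r1 x hx)

-- final fold, shared shape: conditional insert of the best inverse

theorem pv_finalA (ts : List (String × String × String)) (mf : Int) :
    ((((pvK ts).filter (fun r1 => decide (pvQual ts mf r1 ≠ []))).map
        (fun r1 => (r1, pvCand ts mf r1))).foldl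
      (fun inv rc => if rc.2.size ≠ 0 then
          match PySem.List.max? rc.2.keys (fun x => rc.2.getD x 0) with
          | some best => inv.insert rc.1 best
          | none => inv
        else inv) PySem.Dict.empty).items = pvOut ts mf := by
  rw [List.foldl_map]
  rw [PySem.List.foldl_congr_mem _ _ (fun inv r1 => inv.insert r1 (pvBest ts mf r1)) _ ?_]
  · exact pv_insertfold ts mf
  · intro inv r1 hr1
    have hq : pvQual ts mf r1 ≠ [] := by
      have := List.of_mem_filter hr1
      simpa using this
    have hsize : (pvCand ts mf r1).size ≠ 0 := by
      show (pvCand ts mf r1).items.length ≠ 0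
      rw [pvCand_items]
      simpa using hq
    rw [if_pos hsize, pv_maxCand]
    obtain ⟨b, hb⟩ : ∃ b, PySem.List.max? (pvQual ts mf r1) (fun r2 => pvCnt ts r1 r2) = some b := by
      rcases h : PySem.List.max? (pvQual ts mf r1) (fun r2 => pvCnt ts r1 r2) with _ | b
      · exact absurd ((PySem.List.max?_eq_none_iff _ _).mp h) hq
      · exact ⟨b, rfl⟩
    rw [hb]
    have hbb : pvBest ts mf r1 = b := by rw [pvBest, hb]; rfl
    show inv.insert r1 b = inv.insert r1 (pvBest ts mf r1)
    rw [hbb]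

theorem pv_innerA (ts : List (String × String × String)) (mf : Int) (r1 : String)
    (pi : PySem.Dict String (PySem.Dict String Int)) :
    (pvK ts).foldl (fun pi r2 =>
      if r1 ≠ r2 then
        if mf ≤ pvCnt ts r1 r2 then
          pi.modify r1 PySem.Dict.empty (fun d => d.insert r2 (pvCnt ts r1 r2))
        else pi
      else pi) pi
    = (pvQual ts mf r1).foldl
        (fun pi r2 => pi.modify r1 PySem.Dict.empty (fun d => d.insert r2 (pvCnt ts r1 r2))) pi := by
  rw [PySem.List.foldl_congr_mem _ _
    (fun pi r2 => if r1 ≠ r2 ∧ mf ≤ pvCnt ts r1 r2 then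
      pi.modify r1 PySem.Dict.empty (fun d => d.insert r2 (pvCnt ts r1 r2)) else pi) _
    (fun acc x _ => by by_cases h1 : r1 ≠ x <;> by_cases h2 : mf ≤ pvCnt ts r1 x <;>
      simp [h1, h2])]
  rw [PySem.List.foldl_ite_eq_foldl_filter]
  rfl

theorem pv_potA (ts : List (String × String × String)) (mf : Int) :
    pvA_potential (pvA_relationPairs ts) mf
    = (pvK ts).foldl (fun pi r1 => (pvQual ts mf r1).foldl
        (fun pi r2 => pi.modify r1 PySem.Dict.empty (fun d => d.insert r2 (pvCnt ts r1 r2))) pi)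
        PySem.Dict.empty := by
  rw [pvA_potential, pvA_items]
  simp only [List.foldl_map]
  exact PySem.List.foldl_congr_mem _ _ _ _ (fun pi r1 _ => pv_innerA ts mf r1 pi)

theorem pv_potA_items (ts : List (String × String × String)) (mf : Int) :
    (pvA_potential (pvA_relationPairs ts) mf).items
    = ((pvK ts).filter (fun r1 => decide (pvQual ts mf r1 ≠ []))).map
        (fun r1 => (r1, pvCand ts mf r1)) := by
  rw [pv_potA]
  obtain ⟨o1, o2, o3⟩ := pv_outerA ts mf (pvK ts) PySem.Dict.empty (pvK_nodup ts)
    (fun r _ => PySem.Dict.get?_empty r)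
  have hkeys : ((pvK ts).foldl (fun pi r1 => (pvQual ts mf r1).foldl
      (fun pi r2 => pi.modify r1 PySem.Dict.empty (fun d => d.insert r2 (pvCnt ts r1 r2))) pi)
      PySem.Dict.empty).keys
      = (pvK ts).filter (fun r1 => decide (pvQual ts mf r1 ≠ [])) := by
    rw [o3]; rfl
  have hnd : ((pvK ts).foldl (fun pi r1 => (pvQual ts mf r1).foldl
      (fun pi r2 => pi.modify r1 PySem.Dict.empty (fun d => d.insert r2 (pvCnt ts r1 r2))) pi)
      PySem.Dict.empty).keys.Nodup := by
    rw [hkeys]; exact (pvK_nodup ts).filter _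
  rw [PySem.Dict.items_eq_map_keys _ hnd PySem.Dict.empty, hkeys]
  refine List.map_congr_left (fun r1 hr1 => ?_)
  have hq : pvQual ts mf r1 ≠ [] := by simpa using List.of_mem_filter hr1
  have hrK : r1 ∈ pvK ts := List.mem_of_mem_filter hr1
  have h2 := o2 r1 hrK
  rw [if_neg hq] at h2
  rw [PySem.Dict.getD_eq_get?_getD, h2]
  rfl

theorem portA_eq_pvOut (ts : List (String × String × String)) (mf : Int) :
    infer_inverse_relations_py ts mf = pvOut ts mf := by
  show (pvA_final (pvA_potential (pvA_relationPairs ts) mf)).items = pvOut ts mf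
  rw [pvA_final, pv_potA_items]
  exact pv_finalA ts mf

theorem pv_modify_insert_empty {ν : Type} (d : PySem.Dict String ν) (k : String) (d0 : ν)
    (f : ν → ν) (h : d.contains k = false) :
    (d.insert k d0).modify k d0 f = d.modify k d0 f := by
  show (d.insert k d0).insert k (f ((d.insert k d0).getD k d0)) = d.insert k (f (d.getD k d0))
  rw [PySem.Dict.getD_insert_self, PySem.Dict.insert_insert_self,
    PySem.Dict.getD_of_not_contains d d0 h]

-- B's grouping loop carries A's dict plus its key list
theorem pv_group_aux (l : List (String × String × String))
    (d : PySem.Dict String (PySem.Set (String × String))) :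
    l.foldl (fun st t =>
        let st' := if st.2.contains t.2.1 then st else (st.1 ++ [t.2.1], st.2.insert t.2.1 [])
        (st'.1, st'.2.modify t.2.1 [] (fun s => PySem.Set.add s (t.1, t.2.2)))) (d.keys, d)
    = ((l.foldl (fun d t => d.modify t.2.1 [] (fun s => PySem.Set.add s (t.1, t.2.2))) d).keys,
        l.foldl (fun d t => d.modify t.2.1 [] (fun s => PySem.Set.add s (t.1, t.2.2))) d) := by
  induction l generalizing d with
  | nil => rfl
  | cons t l ih =>
    rw [List.foldl_cons, List.foldl_cons]
    have hstep : (let st' := if (d.keys, d).2.contains t.2.1 = true then (d.keys, d)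
          else ((d.keys, d).1 ++ [t.2.1], (d.keys, d).2.insert t.2.1 [])
        (st'.1, st'.2.modify t.2.1 [] (fun s => PySem.Set.add s (t.1, t.2.2))))
        = ((d.modify t.2.1 [] (fun s => PySem.Set.add s (t.1, t.2.2))).keys,
            d.modify t.2.1 [] (fun s => PySem.Set.add s (t.1, t.2.2))) := by
      by_cases h : d.contains t.2.1 = true
      · rw [if_pos (show (d.keys, d).2.contains t.2.1 = true from h)]
        show (d.keys, d.modify t.2.1 [] (fun s => PySem.Set.add s (t.1, t.2.2))) = _
        have hm := (PySem.Dict.contains_iff_mem_keys d t.2.1).mp h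
        rw [pv_keys_modify]
        simp [PySem.Set.add, hm]
      · rw [if_neg (show ¬ (d.keys, d).2.contains t.2.1 = true from h)]
        show (d.keys ++ [t.2.1],
            (d.insert t.2.1 []).modify t.2.1 [] (fun s => PySem.Set.add s (t.1, t.2.2))) = _
        have hb : d.contains t.2.1 = false := by simpa using h
        have hm : t.2.1 ∉ d.keys := fun hmem => h ((PySem.Dict.contains_iff_mem_keys d t.2.1).mpr hmem)
        rw [pv_modify_insert_empty d t.2.1 [] _ hb, pv_keys_modify]
        simp [PySem.Set.add, hm]
    rw [hstep]
    exact ih _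

theorem pv_group (ts : List (String × String × String)) :
    pvB_group ts = (pvK ts, pvA_relationPairs ts) := by
  have := pv_group_aux ts PySem.Dict.empty
  simpa [pvB_group, pvK, pvA_relationPairs] using this

-- the reversed-pair index: the value at q lists, in order, the relations whose
-- pair set contains q (each once, because pair sets have no duplicates)
theorem pv_rels_aux (K' : List String) (ts : List (String × String × String))
    (d : PySem.Dict (String × String) (List String)) (q : String × String) :
    (K'.foldl (fun d r =>
        ((pvA_relationPairs ts).getD r []).foldl
          (fun d q' => d.modify q' [] (fun l => l ++ [r])) d) d).getD q []
    = d.getD q [] ++ K'.filter (fun r => PySem.Set.contains (pvPairs ts r) q) := by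
  induction K' generalizing d with
  | nil => simp
  | cons r K' ih =>
    rw [List.foldl_cons, ih, List.filter_cons]
    have hinner : (((pvA_relationPairs ts).getD r []).foldl
        (fun d q' => d.modify q' [] (fun l => l ++ [r])) d).getD q []
        = d.getD q [] ++ (if PySem.Set.contains (pvPairs ts r) q then [r] else []) := by
      have hm : ((pvPairs ts r).map (fun q' => (q', r))).foldl
          (fun d p => d.modify p.1 [] (fun l => l ++ [p.2])) d
          = ((pvA_relationPairs ts).getD r []).foldl
            (fun d q' => d.modify q' [] (fun l => l ++ [r])) d := by
        rw [List.foldl_map]; rfl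
      rw [← hm, PySem.Dict.getD_foldl_modify_append]

      congr 1
      rw [List.filter_map]
      have hcomp : ((fun p : (String × String) × String => p.1 == q) ∘ fun q' => (q', r))
          = (fun q' => q' == q) := rfl
      rw [hcomp, List.map_map]
      rw [List.filter_beq]
      by_cases hq : q ∈ pvPairs ts r
      · have h1 : (pvPairs ts r).count q = 1 :=
          List.count_eq_one_of_mem (pvPairs_nodup ts r) hq
        rw [h1]
        simp [PySem.Set.contains, hq]
      · have h0 : (pvPairs ts r).count q = 0 := List.count_eq_zero_of_not_mem hq
        rw [h0]
        simp [PySem.Set.contains, hq]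
    rw [hinner]
    rcases hb : PySem.Set.contains (pvPairs ts r) q with _ | _
    · simp
    · simp

theorem pv_rels_getD (ts : List (String × String × String)) (q : String × String) :
    (pvB_rels (pvK ts) (pvA_relationPairs ts)).getD q []
    = (pvK ts).filter (fun r => PySem.Set.contains (pvPairs ts r) q) := by
  have := pv_rels_aux (pvK ts) ts PySem.Dict.empty q
  simpa [pvB_rels] using this

theorem pvCnt_eq_countP (ts : List (String × String × String)) (r1 r2 : String) :
    pvCnt ts r1 r2
    = ((pvPairs ts r1).countP (fun so => PySem.Set.contains (pvPairs ts r2) (so.2, so.1)) : Int) := by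
  rw [pvCnt, PySem.List.sum_map_const_int, List.countP_eq_length_filter]
  ring

-- the counts dict of B: getD r2 0 accumulates one per reversed pair hit
theorem pv_counts_aux (ts : List (String × String × String)) (r1 r2 : String)
    (h2 : r2 ≠ r1) (hK : r2 ∈ pvK ts) (L : List (String × String))
    (c0 : PySem.Dict String Int) :
    (L.foldl (fun c so =>
        (((pvK ts).filter (fun r => PySem.Set.contains (pvPairs ts r) (so.2, so.1))).foldl
          (fun c r2' => if r2' ≠ r1 then c.modify r2' 0 (· + 1) else c) c) ) c0).getD r2 0
    = c0.getD r2 0 + (L.countP (fun so => PySem.Set.contains (pvPairs ts r2) (so.2, so.1)) : Int) := by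
  induction L generalizing c0 with
  | nil => simp
  | cons so L ih =>
    rw [List.foldl_cons, ih, List.countP_cons]
    have hinner : (((pvK ts).filter (fun r => PySem.Set.contains (pvPairs ts r) (so.2, so.1))).foldl
        (fun c r2' => if r2' ≠ r1 then c.modify r2' 0 (· + 1) else c) c0).getD r2 0
        = c0.getD r2 0 + (if PySem.Set.contains (pvPairs ts r2) (so.2, so.1) then 1 else 0 : Int) := by
      rw [PySem.List.foldl_ite_eq_foldl_filter (fun r2' => r2' ≠ r1)
        (fun (c : PySem.Dict String Int) (r2' : String) => c.modify r2' 0 (· + 1))]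
      rw [PySem.Dict.getD_foldl_modify_add_one]
      congr 1
      rw [List.count_filter (by simpa using h2)]
      rcases hb : PySem.Set.contains (pvPairs ts r2) (so.2, so.1) with _ | _
      · have : r2 ∉ (pvK ts).filter (fun r => PySem.Set.contains (pvPairs ts r) (so.2, so.1)) := by
          intro hmem
          rw [List.mem_filter] at hmem
          rw [hmem.2] at hb
          cases hb
        rw [List.count_eq_zero_of_not_mem this]
        rfl
      · have hmem : r2 ∈ (pvK ts).filter (fun r => PySem.Set.contains (pvPairs ts r) (so.2, so.1)) :=
          List.mem_filter.mpr ⟨hK, hb⟩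
        have : ((pvK ts).filter (fun r => PySem.Set.contains (pvPairs ts r) (so.2, so.1))).count r2 = 1 :=
          List.count_eq_one_of_mem ((pvK_nodup ts).filter _) hmem
        rw [this]
        rfl
    rw [hinner]
    ring_nf
    rcases hb : PySem.Set.contains (pvPairs ts r2) (so.2, so.1) with _ | _
    · simp
    · simp; ring

theorem pv_counts_getD (ts : List (String × String × String)) (r1 r2 : String)
    (h2 : r2 ≠ r1) (hK : r2 ∈ pvK ts) :
    (pvB_counts (pvA_relationPairs ts)
      (pvB_rels (pvK ts) (pvA_relationPairs ts)) r1).getD r2 0 = pvCnt ts r1 r2 := by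
  rw [pvB_counts]
  rw [PySem.List.foldl_congr_mem _ _
    (fun c so => (((pvK ts).filter (fun r => PySem.Set.contains (pvPairs ts r) (so.2, so.1))).foldl
      (fun c r2' => if r2' ≠ r1 then c.modify r2' 0 (· + 1) else c) c)) _
    (fun acc so _ => by rw [pv_rels_getD])]
  rw [pv_counts_aux ts r1 r2 h2 hK]
  rw [pvCnt_eq_countP, PySem.Dict.getD_empty, zero_add]
  rfl

-- B's selection scan and Python max's fold, named so they can be rewritten
def pvSelStep (ts : List (String × String × String)) (mf : Int) (r1 : String)
    (b : Option String × Option Int) (r2 : String) : Option String × Option Int :=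
  if r2 = r1 then b
  else
    let c := pvCnt ts r1 r2
    if (decide (mf ≤ c) && (match b.2 with | none => true | some bc => decide (bc < c))) = true
    then (some r2, some c) else b

def pvMStep (ts : List (String × String × String)) (r1 : String)
    (acc : Option String) (x : String) : Option String :=
  match acc with
  | none => some x
  | some m => if pvCnt ts r1 m < pvCnt ts r1 x then some x else some m

-- B's linear scan keeps the first qualifying relation of maximal count
theorem pv_sel_aux (ts : List (String × String × String)) (mf : Int) (r1 : String)
    (K' : List String) :
    ∀ acc : Option String,
    K'.foldl (pvSelStep ts mf r1) (acc, acc.map (fun m => pvCnt ts r1 m))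
    = ((K'.filter (fun r2 => decide (r1 ≠ r2 ∧ mf ≤ pvCnt ts r1 r2))).foldl (pvMStep ts r1) acc,
       ((K'.filter (fun r2 => decide (r1 ≠ r2 ∧ mf ≤ pvCnt ts r1 r2))).foldl (pvMStep ts r1) acc).map
         (fun m => pvCnt ts r1 m)) := by
  induction K' with
  | nil => intro acc; rfl
  | cons r2 K' ih =>
    intro acc
    rw [List.foldl_cons, List.filter_cons]
    by_cases hr : r2 = r1
    · have hpred : decide (r1 ≠ r2 ∧ mf ≤ pvCnt ts r1 r2) = false := by simp [hr]
      rw [hpred, if_neg (by simp)]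
      rw [show pvSelStep ts mf r1 (acc, acc.map (fun m => pvCnt ts r1 m)) r2
          = (acc, acc.map (fun m => pvCnt ts r1 m)) from by simp [pvSelStep, hr]]
      exact ih acc
    · by_cases hc : mf ≤ pvCnt ts r1 r2
      · have hpred : decide (r1 ≠ r2 ∧ mf ≤ pvCnt ts r1 r2) = true := by
          simp [Ne.symm hr, hc]
        rw [hpred, if_pos rfl]
        cases acc with
        | none =>
          rw [show pvSelStep ts mf r1 ((none : Option String), Option.map (fun m => pvCnt ts r1 m) none) r2
              = (some r2, (some r2).map (fun m => pvCnt ts r1 m)) from by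
            simp [pvSelStep, hr, hc]]
          rw [ih (some r2), List.foldl_cons]
          rw [show pvMStep ts r1 none r2 = some r2 from rfl]
        | some m =>
          by_cases hlt : pvCnt ts r1 m < pvCnt ts r1 r2
          · rw [show pvSelStep ts mf r1 (some m, Option.map (fun m => pvCnt ts r1 m) (some m)) r2
                = (some r2, (some r2).map (fun m => pvCnt ts r1 m)) from by
              simp [pvSelStep, hr, hc, hlt]]
            rw [ih (some r2), List.foldl_cons]
            rw [show pvMStep ts r1 (some m) r2 = some r2 from by simp [pvMStep, hlt]]
          · rw [show pvSelStep ts mf r1 (some m, Option.map (fun m => pvCnt ts r1 m) (some m)) r2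
                = (some m, (some m).map (fun m => pvCnt ts r1 m)) from by
              simp [pvSelStep, hr, hc, hlt]]
            rw [ih (some m), List.foldl_cons]
            rw [show pvMStep ts r1 (some m) r2 = some m from by simp [pvMStep, hlt]]
      · have hpred : decide (r1 ≠ r2 ∧ mf ≤ pvCnt ts r1 r2) = false := by simp [hc]
        rw [hpred, if_neg (by simp)]
        rw [show pvSelStep ts mf r1 (acc, acc.map (fun m => pvCnt ts r1 m)) r2
            = (acc, acc.map (fun m => pvCnt ts r1 m)) from by simp [pvSelStep, hr, hc]]
        exact ih acc

theorem pv_sel (ts : List (String × String × String)) (mf : Int) (r1 : String) :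
    (pvB_best (pvK ts)
      (pvB_counts (pvA_relationPairs ts) (pvB_rels (pvK ts) (pvA_relationPairs ts)) r1) mf r1).1
    = PySem.List.max? (pvQual ts mf r1) (fun r2 => pvCnt ts r1 r2) := by
  rw [pvB_best]
  rw [PySem.List.foldl_congr_mem _ _ (pvSelStep ts mf r1) _ (fun b x hx => by
    by_cases hr : x = r1
    · simp [pvSelStep, hr]
    · simp only [pvSelStep, if_neg hr]
      rw [pv_counts_getD ts r1 x hr hx])]
  have haux := pv_sel_aux ts mf r1 (pvK ts) none
  simp only [Option.map_none] at haux
  rw [haux]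
  show List.foldl (pvMStep ts r1) none (pvQual ts mf r1) = _
  exact (PySem.List.foldl_congr_mem (pvQual ts mf r1) _ _ none
    (fun acc x _ => by cases acc <;> rfl)).symm

theorem portB_eq_pvOut (ts : List (String × String × String)) (mf : Int) :
    infer_inverse_relations_py_alt ts mf = pvOut ts mf := by
  simp only [infer_inverse_relations_py_alt, pv_group]
  rw [PySem.List.foldl_congr_mem _ _
    (fun inv r1 => if pvQual ts mf r1 ≠ [] then inv.insert r1 (pvBest ts mf r1) else inv) _
    (fun inv r1 _ => by
      rw [show (pvB_best (pvK ts, pvA_relationPairs ts).1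
          (pvB_counts (pvK ts, pvA_relationPairs ts).2
            (pvB_rels (pvK ts, pvA_relationPairs ts).1 (pvK ts, pvA_relationPairs ts).2) r1) mf r1)
          = (pvB_best (pvK ts)
              (pvB_counts (pvA_relationPairs ts) (pvB_rels (pvK ts) (pvA_relationPairs ts)) r1) mf r1)
          from rfl, pv_sel ts mf r1]
      rcases hq : PySem.List.max? (pvQual ts mf r1) (fun r2 => pvCnt ts r1 r2) with _ | b
      · have hnil : pvQual ts mf r1 = [] := (PySem.List.max?_eq_none_iff _ _).mp hq
        show _ = if pvQual ts mf r1 ≠ [] then inv.insert r1 (pvBest ts mf r1) else inv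
        rw [if_neg (by simpa using hnil)]
      · have hne : pvQual ts mf r1 ≠ [] := by
          intro hnil
          rw [show PySem.List.max? (pvQual ts mf r1) (fun r2 => pvCnt ts r1 r2) = none from
            (PySem.List.max?_eq_none_iff _ _).mpr hnil] at hq
          cases hq
        show _ = if pvQual ts mf r1 ≠ [] then inv.insert r1 (pvBest ts mf r1) else inv
        rw [if_pos hne]
        have hbb : pvBest ts mf r1 = b := by rw [pvBest, hq]; rfl
        show inv.insert r1 b = _
        rw [hbb])]
  rw [PySem.List.foldl_ite_eq_foldl_filter (fun r1 => pvQual ts mf r1 ≠ [])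
    (fun (inv : PySem.Dict String String) r1 => inv.insert r1 (pvBest ts mf r1))]
  exact pv_insertfold ts mf

-- ===== VERDICT (by name: the statement is the Claim_ definition above) =====
theorem infer_inverse_relations_py_spec : Claim_equal_infer_inverse_relations_py := by
  intro ts mf _
  unfold Spec_infer_inverse_relations_py
  rw [portA_eq_pvOut, portB_eq_pvOut]
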